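-- pv_equiv track=rewrite | github.com/Srivatsan0405/Leetcode | 3842-toggle-light-bulbs/3842-toggle-light-bulbs.py | toggleLightBulbs
-- ===== SOURCE A (Python) =====
-- def toggleLightBulbs(bulbs: list[int]) -> list[int]:
--     s=set()
--     for i in bulbs:
--         if i in s:
--             s.remove(i)
--         else:
--             s.add(i)
--     l=list(s)
--     l.sort()
--     return l
-- ===== SOURCE B (Python) =====
-- def toggleLightBulbs(bulbs: list[int]) -> list[int]:
--     xs = sorted(bulbs)
--     res = []
--     i = 0
--     n = len(xs)
--     while i < n:
--         j = i + 1
--         while j < n and xs[j] == xs[i]: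
--             j += 1
--         if (j - i) % 2 == 1:
--             res.append(xs[i])
--         i = j
--     return res
-- ===== Notes on version B (the rewrite author's own statement) =====
-- stated objective: alternative
-- what changed: Sort the input first, then a single scan over runs of equal adjacent values keeps the values whose run length is odd; no set or dict and no per-element membership toggling.
import Mathlib
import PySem

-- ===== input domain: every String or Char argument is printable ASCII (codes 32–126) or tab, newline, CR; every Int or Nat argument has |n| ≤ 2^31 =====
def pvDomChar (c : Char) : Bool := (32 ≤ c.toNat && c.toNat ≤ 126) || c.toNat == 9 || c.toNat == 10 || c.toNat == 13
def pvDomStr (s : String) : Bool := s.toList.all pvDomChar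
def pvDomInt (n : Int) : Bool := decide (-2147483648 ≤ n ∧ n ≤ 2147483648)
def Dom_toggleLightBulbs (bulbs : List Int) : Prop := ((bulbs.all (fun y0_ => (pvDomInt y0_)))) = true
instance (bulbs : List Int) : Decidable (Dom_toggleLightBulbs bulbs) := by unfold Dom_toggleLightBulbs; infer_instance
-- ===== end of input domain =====

-- B sorts first and then makes a single scan over runs of equal adjacent values,
-- keeping the values whose run length is odd — no set and no membership toggling.

-- ===== PORT A =====
-- the loop body of A: toggle membership of i in the set s
def pvToggleStep (s : PySem.Set Int) (i : Int) : PySem.Set Int :=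
  if PySem.Set.contains s i then (PySem.Set.remove? s i).getD s
  else PySem.Set.add s i

def toggleLightBulbs (bulbs : List Int) : List Int :=
  let s : PySem.Set Int := bulbs.foldl pvToggleStep PySem.Set.empty
  PySem.List.sorted s (fun x => x) false

-- ===== PORT B =====
-- the outer while loop of Source B over the sorted list: split off the run of values
-- equal to the first element (the inner 'while xs[j] == xs[i]: j += 1'), keep the
-- value if the run length j - i is odd, continue at i = j.
def pvScan : List Int → List Int
  | [] => []
  | x :: rest =>
    let run := rest.takeWhile (fun y => y == x)
    let tail := rest.dropWhile (fun y => y == x)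
    (if (1 + run.length) % 2 == 1 then [x] else []) ++ pvScan tail
termination_by xs => xs.length
decreasing_by
  simp only [List.length_cons]
  exact Nat.lt_succ_of_le (List.Sublist.length_le (List.dropWhile_sublist _))

def toggleLightBulbs_alt (bulbs : List Int) : List Int :=
  pvScan (PySem.List.sorted bulbs (fun x => x) false)

-- ===== PRECONDITION & SPEC =====
def Spec_toggleLightBulbs (bulbs : List Int) (out : List Int) : Prop := out = toggleLightBulbs_alt bulbs
instance (bulbs : List Int) (out : List Int) : Decidable (Spec_toggleLightBulbs bulbs out) := by unfold Spec_toggleLightBulbs; infer_instance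

-- ===== CLAIM (what is proved, stated in full; the proofs are below) =====
def Claim_equal_toggleLightBulbs : Prop := ∀ (bulbs : List Int), Dom_toggleLightBulbs bulbs → Spec_toggleLightBulbs bulbs (toggleLightBulbs bulbs)

-- ===== LEMMAS AND PROOFS =====

-- A's toggled set: no duplicates, and membership tracks the parity of the count seen so far
lemma pv_toggle_inv (xs : List Int) : ∀ (s : PySem.Set Int), s.Nodup →
    (List.foldl pvToggleStep s xs).Nodup ∧
    ∀ y, y ∈ List.foldl pvToggleStep s xs ↔ ((y ∈ s) ↔ xs.count y % 2 = 0) := by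
  induction xs with
  | nil => intro s hs; exact ⟨hs, by simp⟩
  | cons x xs ih =>
    intro s hs
    by_cases hx : x ∈ s
    · have hstep : pvToggleStep s x = PySem.Set.discard s x := by
        unfold pvToggleStep
        rw [if_pos ((PySem.Set.contains_iff s x).2 hx), PySem.Set.remove?_of_mem hx]
        rfl
      obtain ⟨hn, hm⟩ := ih (PySem.Set.discard s x) (PySem.Set.nodup_discard s x hs)
      refine ⟨by simpa [List.foldl_cons, hstep] using hn, fun y => ?_⟩
      rw [List.foldl_cons, hstep, hm y, PySem.Set.mem_discard]
      by_cases hyx : y = x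
      · subst hyx
        have hc : List.count y (y :: xs) = List.count y xs + 1 := by simp
        rw [hc]; simp [hx]; omega
      · have hc : List.count y (x :: xs) = List.count y xs := by
          simp [Ne.symm hyx]
        rw [hc]; simp [hyx]
    · have hstep : pvToggleStep s x = s ++ [x] := by
        unfold pvToggleStep
        rw [if_neg (fun h => hx ((PySem.Set.contains_iff s x).1 h)),
          PySem.Set.add_of_not_mem hx]
      have hn' : (s ++ [x]).Nodup :=
        List.Nodup.append hs (List.nodup_singleton x)
          (fun a ha hb => hx ((List.mem_singleton.1 hb) ▸ ha))
      obtain ⟨hn, hm⟩ := ih (s ++ [x]) hn'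
      refine ⟨by simpa [List.foldl_cons, hstep] using hn, fun y => ?_⟩
      rw [List.foldl_cons, hstep, hm y, List.mem_append]
      by_cases hyx : y = x
      · subst hyx
        have hc : List.count y (y :: xs) = List.count y xs + 1 := by simp
        rw [hc]; simp [hx]; omega
      · have hc : List.count y (x :: xs) = List.count y xs := by
          simp [Ne.symm hyx]
        rw [hc]; simp [hyx]

lemma pvScan_cons (x : Int) (rest : List Int) :
    pvScan (x :: rest) =
      (if (1 + (rest.takeWhile (fun y => y == x)).length) % 2 == 1 then [x] else []) ++
        pvScan (rest.dropWhile (fun y => y == x)) := by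
  rw [pvScan]

-- in a sorted list, everything after the initial run of x's is strictly greater than x
lemma pv_lt_of_mem_dropWhile (x : Int) :
    ∀ (rest : List Int), (∀ z ∈ rest, x ≤ z) → rest.Pairwise (· ≤ ·) →
    ∀ y ∈ rest.dropWhile (fun y => y == x), x < y := by
  intro rest
  induction rest with
  | nil => intro _ _ y hy; simp [List.dropWhile] at hy
  | cons z rs ih =>
    intro hle hp y hy
    by_cases hz : z = x
    · rw [List.dropWhile_cons_of_pos (by simp [hz])] at hy
      exact ih (fun w hw => hz ▸ (List.pairwise_cons.1 hp).1 w hw)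
        (List.pairwise_cons.1 hp).2 y hy
    · rw [List.dropWhile_cons_of_neg (by simp [hz])] at hy
      have hxz : x < z := lt_of_le_of_ne (hle z (by simp)) (Ne.symm hz)
      rcases List.mem_cons.1 hy with rfl | hy'
      · exact hxz
      · exact lt_of_lt_of_le hxz ((List.pairwise_cons.1 hp).1 y hy')

-- B's scan of a sorted list: strictly increasing, and contains exactly the odd-count values
lemma pv_scan_spec : ∀ (ys : List Int), ys.Pairwise (· ≤ ·) →
    (pvScan ys).Pairwise (· < ·) ∧ ∀ y, y ∈ pvScan ys ↔ ys.count y % 2 = 1 := by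
  intro ys
  induction ys using pvScan.induct with
  | case1 => intro _; simp [pvScan]
  | case2 x rest tail ih =>
    intro hp
    obtain ⟨hle, hp'⟩ := List.pairwise_cons.1 hp
    have htl : ∀ y ∈ tail, x < y := pv_lt_of_mem_dropWhile x rest hle hp'
    obtain ⟨ihp, ihm⟩ := ih (hp'.sublist (List.dropWhile_sublist _))
    have hsplit : rest = rest.takeWhile (fun y => y == x) ++ tail :=
      (List.takeWhile_append_dropWhile).symm
    have hrun : ∀ y ∈ rest.takeWhile (fun y => y == x), y = x := fun y hy => by
      simpa using List.mem_takeWhile_imp hy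
    -- counts in x :: rest
    have hcx : (x :: rest).count x = 1 + (rest.takeWhile (fun y => y == x)).length := by
      conv_lhs => rw [hsplit]
      rw [List.count_cons_self, List.count_append]
      have h1 : (rest.takeWhile (fun y => y == x)).count x = (rest.takeWhile (fun y => y == x)).length :=
        List.count_eq_length.2 (fun y hy => by simp [hrun y hy])
      have h2 : tail.count x = 0 :=
        List.count_eq_zero.2 (fun h => lt_irrefl x (htl x h))
      omega
    have hcy : ∀ y, y ≠ x → (x :: rest).count y = tail.count y := by
      intro y hyx
      have hcr : List.count y (x :: rest) = List.count y rest := by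
        simp [Ne.symm hyx]
      rw [hcr]
      conv_lhs => rw [hsplit]
      rw [List.count_append]
      have h1 : (rest.takeWhile (fun y => y == x)).count y = 0 :=
        List.count_eq_zero.2 (fun h => hyx (hrun y h))
      omega
    have hsub : ∀ y ∈ pvScan tail, x < y := fun y hy => by
      have := (ihm y).1 hy
      exact htl y (List.count_pos_iff.1 (by omega))
    constructor
    · rw [pvScan_cons]
      split
      · exact List.pairwise_cons.2 ⟨hsub, ihp⟩
      · simpa using ihp
    · intro y
      rw [pvScan_cons, List.mem_append, ihm y]
      by_cases hyx : y = x
      · rw [hyx, hcx]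
        have hnot : ¬ tail.count x % 2 = 1 := by
          have h0 : tail.count x = 0 :=
            List.count_eq_zero.2 (fun h => lt_irrefl x (htl x h))
          omega
        constructor
        · rintro (h | h)
          · split at h
            · next hodd => simpa using (beq_iff_eq.1 hodd)
            · simp at h
          · exact absurd h hnot
        · intro h
          refine Or.inl ?_
          rw [if_pos (beq_iff_eq.2 h)]
          simp
      · rw [hcy y hyx]
        constructor
        · rintro (h | h)
          · split at h
            · exact absurd (List.mem_singleton.1 h) hyx
            · simp at h
          · exact h
        · exact Or.inr

-- ===== VERDICT (by name: the statement is the Claim_ definition above) =====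
theorem toggleLightBulbs_spec : Claim_equal_toggleLightBulbs := by
  intro bulbs _
  unfold Spec_toggleLightBulbs toggleLightBulbs toggleLightBulbs_alt
  obtain ⟨hn, hm⟩ := pv_toggle_inv bulbs PySem.Set.empty (by simp [PySem.Set.empty])
  obtain ⟨hp, hmem⟩ := pv_scan_spec (PySem.List.sorted bulbs (fun x => x) false)
    (by simpa using PySem.List.sorted_pairwise bulbs (fun x => x))
  apply PySem.List.sorted_eq_of_perm_of_pairwise_lt
  · -- pvScan (sorted bulbs) is a permutation of A's toggled set
    have hnodup : (pvScan (PySem.List.sorted bulbs (fun x => x) false)).Nodup :=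
      hp.imp ne_of_lt
    rw [List.perm_ext_iff_of_nodup hnodup hn]
    intro y
    rw [hmem y, hm y,
      (PySem.List.sorted_perm bulbs (fun x => x) false).count_eq y]
    simp only [PySem.Set.empty, List.not_mem_nil, false_iff]
    omega
  · simpa using hp
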